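-- pv_equiv track=rewrite | github.com/miliar/Code_Jam_Webscraper | solutions_python/Problem_53/517.py | snapper_chain
-- ===== SOURCE A (Python) =====
-- def snap(chain,first_plug):
--
--     first_plug[1] = not(first_plug[1])
--     prev = first_plug
--     for s in chain:
--         # toggle if was connected
--         if (s[0]):
--             s[1]=not(s[1])
--
--             # connected if previous is now connected and on
--         if (prev[0] and prev[1]):
--             s[0] = True
--         else:
--             s[0] = False
--         prev = s
--
--     return (prev[0] and prev[1])
--
-- def snapper_chain(n,k):
--
--     # list of pairs [power,on-off]
--     first_plug = [True,False]
--     chain =  [[False,False] for r in range(1,n)]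
--     res = False
--     for s in range(0,k):
--         res = snap(chain,first_plug)
--
--     if (res):
--         return 'ON'
--     else:
--         return 'OFF'
-- ===== SOURCE B (Python) =====
-- def snapper_chain(n, k):
--     # Closed form: the light is ON iff 2^n divides k+1
--     # (i.e. the n lowest bits of k are all ones).
--     t = k + 1
--     if t <= 0:
--         return 'OFF'
--     z = 0
--     while t % 2 == 0:
--         t //= 2
--         z += 1
--     return 'ON' if z >= n else 'OFF'
-- ===== Notes on version B (the rewrite author's own statement) =====
-- stated objective: faster
-- what changed: Replaces the O(n*k) simulation of the snapper chain (k snaps, each walking the n-cell list) by the closed form 'ON iff 2^n divides k+1', computed by counting the trailing zero bits of k+1.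
-- outside the precondition, e.g. on snapper_chain(0, 0): A returns 'OFF', B returns 'ON'; on snapper_chain(0, 2): A returns 'OFF', B returns 'ON'
import Mathlib
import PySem

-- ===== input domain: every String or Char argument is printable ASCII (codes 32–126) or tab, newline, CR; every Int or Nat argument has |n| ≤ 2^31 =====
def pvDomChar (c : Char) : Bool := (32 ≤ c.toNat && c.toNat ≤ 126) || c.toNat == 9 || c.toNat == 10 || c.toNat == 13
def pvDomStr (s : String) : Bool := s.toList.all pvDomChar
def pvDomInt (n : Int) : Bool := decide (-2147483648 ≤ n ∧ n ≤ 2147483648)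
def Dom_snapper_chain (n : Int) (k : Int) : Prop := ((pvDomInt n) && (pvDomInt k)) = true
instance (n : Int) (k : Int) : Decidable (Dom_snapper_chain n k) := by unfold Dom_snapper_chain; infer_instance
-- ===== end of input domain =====

-- B replaces the O(n*k) chain simulation by the closed form "ON iff 2^n divides k+1"
-- (counting trailing zero bits of k+1): asymptotically faster.


-- ===== PORT A =====
-- inner for-loop of snap: walks the chain, rebuilding each cell in place;
-- returns (final prev, updated chain)
def snapGo : (Bool × Bool) → List (Bool × Bool) → (Bool × Bool) × List (Bool × Bool)
  | prev, [] => (prev, [])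
  | prev, s :: rest =>
      let s' : Bool × Bool := (prev.1 && prev.2, if s.1 then !s.2 else s.2)
      let r := snapGo s' rest
      (r.1, s' :: r.2)

-- snap(chain, first_plug): toggles first_plug, walks the chain; returns
-- (result, new first_plug, new chain)
def snapA (fp : Bool × Bool) (chain : List (Bool × Bool)) :
    Bool × (Bool × Bool) × List (Bool × Bool) :=
  let fp' : Bool × Bool := (fp.1, !fp.2)
  let r := snapGo fp' chain
  (r.1.1 && r.1.2, fp', r.2)

-- for s in range(0,k): res = snap(chain, first_plug)
def snapLoop : Nat → (Bool × Bool) → List (Bool × Bool) → Bool → Bool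
  | 0, _, _, res => res
  | f+1, fp, chain, _ =>
      let r := snapA fp chain
      snapLoop f r.2.1 r.2.2 r.1

def snapper_chain (n : Int) (k : Int) : String :=
  let first_plug : Bool × Bool := (true, false)
  let chain := (PySem.List.pyRange 1 n 1).map (fun _ => ((false : Bool), (false : Bool)))
  let res := snapLoop k.toNat first_plug chain false
  if res then "ON" else "OFF"

-- ===== PORT B =====
-- while t % 2 == 0: t //= 2; z += 1   (t ≠ 0 guard only for totality; B runs it with t > 0)
def countTZ (t : Nat) (z : Int) : Int :=
  if h : t % 2 = 0 ∧ t ≠ 0 then countTZ (t / 2) (z + 1) else z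
  termination_by t
  decreasing_by exact Nat.div_lt_self (Nat.pos_of_ne_zero h.2) one_lt_two

def snapper_chain_alt (n : Int) (k : Int) : String :=
  let t := k + 1
  if t ≤ 0 then "OFF"
  else if countTZ t.toNat 0 ≥ n then "ON" else "OFF"

-- ===== PRECONDITION & SPEC =====
-- Pre_ excludes the degenerate chains n ≤ 0 (with k ≥ 0): there A still simulates one
-- snapper — an artifact of range(1,n) being empty — while B's bound z ≥ n holds trivially.
def Pre_snapper_chain (n : Int) (k : Int) : Prop := 1 ≤ n ∨ k < 0
instance (n : Int) (k : Int) : Decidable (Pre_snapper_chain n k) := by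
  unfold Pre_snapper_chain; infer_instance

def pvWitness_snapper_chain : Int × Int := (3, 7)

def Spec_snapper_chain (n : Int) (k : Int) (out : String) : Prop := out = snapper_chain_alt n k
instance (n : Int) (k : Int) (out : String) : Decidable (Spec_snapper_chain n k out) := by
  unfold Spec_snapper_chain; infer_instance

-- ===== CLAIM (what is proved, stated in full; the proofs are below) =====
def Claim_equal_snapper_chain : Prop := ∀ (n : Int) (k : Int), Dom_snapper_chain n k → Pre_snapper_chain n k → Spec_snapper_chain n k (snapper_chain n k)

-- ===== LEMMAS AND PROOFS =====

-- the intended state of cell i after t snaps: (powered, on) =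
-- (the i lowest bits of t are all 1, bit i of t)
def cellS (t i : Nat) : Bool × Bool :=
  (decide (t % 2 ^ i = 2 ^ i - 1), decide (t / 2 ^ i % 2 = 1))

-- result variable after t snaps with chain length m
def resS (t m : Nat) : Bool := if t = 0 then false else (cellS t m).1 && (cellS t m).2

lemma carry_div (p t : Nat) (hp : 0 < p) :
    (t + 1) / p = t / p + (if t % p = p - 1 then 1 else 0) := by
  have h := Nat.div_add_mod t p
  have hlt := Nat.mod_lt t hp
  split
  · next h1 =>
      have hx : p * (t / p + 1) = p * (t / p) + p := by ring
      have he : t + 1 = p * (t / p + 1) := by omega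
      rw [he, Nat.mul_div_cancel_left _ (by omega)]
  · next h1 =>
      have he : t + 1 = p * (t / p) + (t % p + 1) := by omega
      have hz : (t % p + 1) / p = 0 := Nat.div_eq_of_lt (by omega)
      rw [he, Nat.mul_add_div hp, hz, Nat.add_zero]

lemma cell_pow_succ (u i : Nat) :
    (cellS u (i + 1)).1 = ((cellS u i).1 && (cellS u i).2) := by
  simp only [cellS, ← Bool.decide_and]
  rw [decide_eq_decide]
  have hp : 0 < 2 ^ i := Nat.two_pow_pos i
  have hm : u % 2 ^ (i + 1) = u % 2 ^ i + 2 ^ i * (u / 2 ^ i % 2) := by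
    rw [pow_succ]; exact Nat.mod_mul
  have h1 := Nat.mod_lt u hp
  have h3 : (2:Nat) ^ (i + 1) = 2 ^ i * 2 := pow_succ 2 i
  rcases Nat.mod_two_eq_zero_or_one (u / 2 ^ i) with hb | hb <;>
    rw [hb] at hm <;> simp only [Nat.mul_zero, Nat.mul_one] at hm <;> omega

lemma cell_on_step (t i : Nat) :
    (cellS (t + 1) i).2 = if (cellS t i).1 then !(cellS t i).2 else (cellS t i).2 := by
  have hp : 0 < 2 ^ i := Nat.two_pow_pos i
  simp only [cellS, carry_div (2 ^ i) t hp]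
  rcases Nat.mod_two_eq_zero_or_one (t / 2 ^ i) with h2 | h2 <;>
    by_cases hc : t % 2 ^ i = 2 ^ i - 1 <;>
      simp [hc, Nat.add_mod, h2]

lemma cell_zero (t : Nat) : cellS t 0 = (true, decide (t % 2 = 1)) := by
  simp [cellS, Nat.mod_one]

lemma cell_step (t i : Nat) :
    ((cellS (t+1) i).1 && (cellS (t+1) i).2,
      if (cellS t (i+1)).1 then !(cellS t (i+1)).2 else (cellS t (i+1)).2) =
    cellS (t + 1) (i + 1) := by
  have h1 := cell_pow_succ (t + 1) i
  have h2 := cell_on_step t (i + 1)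
  exact Prod.ext (h1.symm) (h2.symm)

lemma snapGo_spec (m : Nat) : ∀ (i t : Nat),
    snapGo (cellS (t + 1) i) ((List.range m).map fun j => cellS t (i + 1 + j)) =
      (cellS (t + 1) (i + m), (List.range m).map fun j => cellS (t + 1) (i + 1 + j)) := by
  induction m with
  | zero => intro i t; simp [snapGo]
  | succ m ih =>
      intro i t
      rw [List.range_succ_eq_map]
      simp only [List.map_cons, List.map_map, snapGo]
      have hs : ((cellS (t+1) i).1 && (cellS (t+1) i).2,
          if (cellS t (i+1+0)).1 then !(cellS t (i+1+0)).2 else (cellS t (i+1+0)).2) =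
          cellS (t + 1) (i + 1) := by
        simpa using cell_step t i
      rw [hs]
      have hmap : ((List.range m).map (fun j => cellS t (i + 1 + (j + 1)))) =
          ((List.range m).map fun j => cellS t (i + 1 + 1 + j)) := by
        apply List.map_congr_left; intro a _; congr 1; omega
      have hmap' : (Function.comp (fun j => cellS t (i + 1 + j)) Nat.succ) =
          (fun j => cellS t (i + 1 + (j + 1))) := by
        funext j; simp [Function.comp, Nat.succ_eq_add_one]
      rw [hmap', hmap, ih (i + 1) t]
      have hmap2 : (Function.comp (fun j => cellS (t + 1) (i + 1 + j)) Nat.succ) =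
          (fun j => cellS (t + 1) (i + 1 + (j + 1))) := by
        funext j; simp [Function.comp, Nat.succ_eq_add_one]
      dsimp only
      rw [Prod.mk.injEq, List.cons_eq_cons, hmap2]
      refine ⟨by congr 1; omega, rfl, ?_⟩
      apply List.map_congr_left; intro a _; congr 1; omega

lemma snapLoop_spec (f : Nat) : ∀ (t m : Nat),
    snapLoop f (cellS t 0) ((List.range m).map fun j => cellS t (1 + j)) (resS t m) =
      resS (t + f) m := by
  induction f with
  | zero => intro t m; simp [snapLoop]
  | succ f ih =>
      intro t m
      simp only [snapLoop, snapA]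
      have hfp : ((cellS t 0).1, !(cellS t 0).2) = cellS (t + 1) 0 := by
        rw [cell_zero, cell_zero]
        rcases Nat.mod_two_eq_zero_or_one t with h | h <;> simp [h, Nat.add_mod]
      have hch : ((List.range m).map fun j => cellS t (1 + j)) =
          ((List.range m).map fun j => cellS t (0 + 1 + j)) := rfl
      rw [hfp, hch, snapGo_spec m 0 t]
      have hres : ((cellS (t+1) (0+m)).1 && (cellS (t+1) (0+m)).2) = resS (t + 1) m := by
        simp [resS]
      have hch2 : ((List.range m).map fun j => cellS (t+1) (0 + 1 + j)) =
          ((List.range m).map fun j => cellS (t+1) (1 + j)) := rfl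
      rw [hres, hch2, ih (t + 1) m]
      congr 1; omega

lemma chain_init (n : Int) :
    ((PySem.List.pyRange 1 n 1).map (fun _ => ((false : Bool), (false : Bool)))) =
      ((List.range (n - 1).toNat).map fun j => cellS 0 (1 + j)) := by
  have h1 : ∀ (l : List Int), (l.map fun _ => ((false : Bool), (false : Bool))) =
      List.replicate l.length (false, false) := by
    intro l; induction l with
    | nil => simp
    | cons a l ih => simp [List.replicate, ih]
  rw [h1, PySem.List.length_pyRange_one]
  have h2 : ∀ j : Nat, cellS 0 (1 + j) = (false, false) := by
    intro j
    have hp : 1 < 2 ^ (1 + j) := Nat.one_lt_two_pow (by omega)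
    simp only [cellS, Nat.zero_mod, Nat.zero_div]
    have : ¬ (0 = 2 ^ (1 + j) - 1) := by omega
    simp [this]
  calc List.replicate (n - 1).toNat ((false : Bool), (false : Bool))
      = (List.range (n - 1).toNat).map (fun _ => ((false : Bool), (false : Bool))) := by
        rw [List.map_const', List.length_range]
    _ = (List.range (n - 1).toNat).map fun j => cellS 0 (1 + j) := by
        apply List.map_congr_left; intro a _; rw [h2]

lemma countTZ_acc (t : Nat) : ∀ z : Int, countTZ t z = z + countTZ t 0 := by
  induction t using Nat.strong_induction_on with
  | _ t ih =>
      intro z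
      by_cases h : t % 2 = 0 ∧ t ≠ 0
      · have hlt : t / 2 < t := Nat.div_lt_self (Nat.pos_of_ne_zero h.2) one_lt_two
        rw [countTZ, dif_pos h, ih _ hlt (z + 1)]
        conv_rhs => rw [countTZ, dif_pos h, ih _ hlt (0 + 1)]
        omega
      · rw [countTZ, dif_neg h]
        conv_rhs => rw [countTZ, dif_neg h]
        omega

lemma countTZ_nonneg (t : Nat) : 0 ≤ countTZ t 0 := by
  induction t using Nat.strong_induction_on with
  | _ t ih =>
      by_cases h : t % 2 = 0 ∧ t ≠ 0
      · have hlt : t / 2 < t := Nat.div_lt_self (Nat.pos_of_ne_zero h.2) one_lt_two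
        rw [countTZ, dif_pos h, countTZ_acc]
        have := ih _ hlt
        omega
      · rw [countTZ, dif_neg h]

lemma countTZ_ge (nn : Nat) : ∀ t : Nat, t ≠ 0 → ((nn : Int) ≤ countTZ t 0 ↔ 2 ^ nn ∣ t) := by
  induction nn with
  | zero =>
      intro t _
      simp [countTZ_nonneg t]
  | succ nn ih =>
      intro t ht
      by_cases he : t % 2 = 0
      · have ht2 : t / 2 ≠ 0 := by omega
        rw [countTZ, dif_pos (And.intro he ht), countTZ_acc]
        have hiff := ih (t / 2) ht2
        have heq : t = 2 * (t / 2) := by omega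
        constructor
        · intro h
          have : (nn : Int) ≤ countTZ (t / 2) 0 := by push_cast at h ⊢; omega
          rw [heq, pow_succ, mul_comm (2 ^ nn) 2]
          exact mul_dvd_mul_left 2 (hiff.mp this)
        · intro h
          rw [heq, pow_succ, mul_comm (2 ^ nn) 2] at h
          have := hiff.mpr ((mul_dvd_mul_iff_left (by norm_num : (2:Nat) ≠ 0)).mp h)
          push_cast; omega
      · have hno : ¬ (t % 2 = 0 ∧ t ≠ 0) := by tauto
        rw [countTZ, dif_neg hno]
        constructor
        · intro h; exfalso; push_cast at h; omega
        · intro h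
          exfalso
          have h2 : (2:Nat) ∣ t := dvd_trans (dvd_pow_self 2 (Nat.succ_ne_zero nn)) h
          omega

lemma mod_all_ones (p t : Nat) (hp : 0 < p) : t % p = p - 1 ↔ p ∣ t + 1 := by
  rw [Nat.dvd_iff_mod_eq_zero]
  have h1 := Nat.div_add_mod t p
  have h2 := Nat.div_add_mod (t + 1) p
  have h3 := carry_div p t hp
  have h4 := Nat.mod_lt t hp
  have h5 := Nat.mod_lt (t + 1) hp
  by_cases hc : t % p = p - 1
  · rw [if_pos hc] at h3
    have h6 : p * ((t + 1) / p) = p * (t / p) + p := by rw [h3]; ring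
    omega
  · rw [if_neg hc] at h3
    have h6 : p * ((t + 1) / p) = p * (t / p) := by rw [h3]; ring
    omega

-- ===== VERDICT (by name: the statement is the Claim_ definition above) =====
theorem snapper_chain_spec : Claim_equal_snapper_chain := by
  intro n k _ hpre
  unfold Spec_snapper_chain snapper_chain snapper_chain_alt
  dsimp only
  by_cases hk : k < 0
  · have h0 : k.toNat = 0 := by omega
    have h1 : k + 1 ≤ 0 := by omega
    simp only [h0, h1, if_pos, snapLoop]
    simp
  · -- k ≥ 0, hence n ≥ 1 from Pre_
    have hn : 1 ≤ n := by cases hpre with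
      | inl h => exact h
      | inr h => omega
    have hk0 : 0 ≤ k := by omega
    have hne : ¬ (k + 1 ≤ 0) := by omega
    set m := (n - 1).toNat with hm
    have hc0 : cellS 0 0 = (true, false) := by decide
    have hr0 : resS 0 m = false := by simp [resS]
    rw [chain_init n, ← hc0, ← hr0, snapLoop_spec k.toNat 0 m]
    have htn : (k + 1).toNat = k.toNat + 1 := by omega
    have hnn : m + 1 = n.toNat := by omega
    have hres : resS (0 + k.toNat) m = (cellS k.toNat (m + 1)).1 := by
      rw [cell_pow_succ]
      simp only [resS, Nat.zero_add]
      by_cases h : k.toNat = 0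
      · rw [if_pos h, h]
        have h2 : (cellS 0 m).2 = false := by simp [cellS]
        rw [h2, Bool.and_false]
      · rw [if_neg h]
    rw [hres]
    have hdvd : (cellS k.toNat (m + 1)).1 = true ↔ 2 ^ (m + 1) ∣ (k.toNat + 1) := by
      simp only [cellS, decide_eq_true_eq]
      exact mod_all_ones (2 ^ (m + 1)) k.toNat (Nat.two_pow_pos _)
    have hctz : countTZ (k + 1).toNat 0 ≥ n ↔ 2 ^ (m + 1) ∣ (k.toNat + 1) := by
      rw [htn, ← countTZ_ge (m + 1) (k.toNat + 1) (by omega)]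
      have : ((m + 1 : Nat) : Int) = n := by omega
      rw [this]
    rw [if_neg hne]
    by_cases hb : (cellS k.toNat (m + 1)).1 = true
    · have hge : countTZ (k + 1).toNat 0 ≥ n := hctz.mpr (hdvd.mp hb)
      simp [hb, hge]
    · rw [Bool.not_eq_true] at hb
      have hnd : ¬ countTZ (k + 1).toNat 0 ≥ n := fun hc => by
        have hh := hdvd.mpr (hctz.mp hc)
        rw [hb] at hh
        exact Bool.false_ne_true hh
      simp [hb, hnd]
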